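-- pv_equiv track=rewrite | github.com/TheKrizzler/fstr | fstr.py | _splitWrites
-- ===== SOURCE A (Python) =====
-- def _splitWrites(tuples):
-- 	initialList = []
-- 	finalList = []
-- 	# Split in four
-- 	for entry in tuples:
-- 		for i in range(2):
-- 			initialList.append((entry[0]+(i*2),(entry[1] >> (16*i)) & 0xFFFF,2))
-- 	# Check for consecutive null-byte writes for optimization
-- 	# This is more relevant for the 64-bit class, but i still left it in just in case
-- 	for index in range(0,len(initialList)-1,2):
-- 		if initialList[index+1][0] - initialList[index][0] == 2 and initialList[index][1] + initialList[index+1][1] == 0: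
-- 			finalList.append((initialList[index][0],initialList[index][1],4))
-- 		else:
-- 			finalList.append((initialList[index][0],initialList[index][1],2))
-- 			finalList.append((initialList[index+1][0],initialList[index+1][1],2))
--
-- 	return sorted(finalList,key=lambda x: x[1])
-- ===== SOURCE B (Python) =====
-- def _splitWrites(tuples):
-- 	result = []
-- 	for addr, value in tuples:
-- 		low = value & 0xFFFF
-- 		high = (value >> 16) & 0xFFFF
-- 		if low == 0 and high == 0:
-- 			result.append((addr, 0, 4))
-- 		else:
-- 			result.append((addr, low, 2))
-- 			result.append((addr + 2, high, 2))
-- 	return sorted(result, key=lambda x: x[1])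
-- ===== Notes on version B (the rewrite author's own statement) =====
-- stated objective: simpler
-- what changed: One direct pass over the input tuples emits the merged or split chunks immediately, eliminating A's intermediate split list and its second index-stepping re-pairing pass.
import Mathlib
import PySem

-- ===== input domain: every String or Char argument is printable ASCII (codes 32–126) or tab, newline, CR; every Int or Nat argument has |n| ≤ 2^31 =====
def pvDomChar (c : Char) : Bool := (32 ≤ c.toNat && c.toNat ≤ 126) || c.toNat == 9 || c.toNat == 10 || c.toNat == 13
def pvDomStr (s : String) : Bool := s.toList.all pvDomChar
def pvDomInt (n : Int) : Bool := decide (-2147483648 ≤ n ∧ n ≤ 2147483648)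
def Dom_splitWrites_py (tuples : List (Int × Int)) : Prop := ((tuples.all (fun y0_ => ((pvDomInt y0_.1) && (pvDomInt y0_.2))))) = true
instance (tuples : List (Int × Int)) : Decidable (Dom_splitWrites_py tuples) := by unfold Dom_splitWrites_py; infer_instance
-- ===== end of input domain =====

-- B fuses A's split pass and re-pairing pass into one direct loop over the tuples (objective: simpler); return value only, no mutation.

-- ===== PORT A =====
-- pyGetD is exact here: the pairing loop only reads indices 0 ≤ index, index+1 < len(initialList).
-- (16 * i).toNat is exact: i ∈ range(2) is nonnegative.
def splitWrites_py (tuples : List (Int × Int)) : List (Int × Int × Int) :=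
  let initialList : List (Int × Int × Int) :=
    tuples.foldl (fun acc entry =>
      (PySem.List.pyRange 0 2 1).foldl (fun (acc2 : List (Int × Int × Int)) (i : Int) =>
        acc2 ++ [(entry.1 + i * 2, PySem.Int.band ((entry.2 : Int) >>> ((16 * i).toNat : Nat)) 0xFFFF, (2 : Int))]) acc) []
  let finalList : List (Int × Int × Int) :=
    (PySem.List.pyRange 0 ((initialList.length : Int) - 1) 2).foldl (fun acc index =>
      let e0 := PySem.List.pyGetD initialList index (0, 0, 0)
      let e1 := PySem.List.pyGetD initialList (index + 1) (0, 0, 0)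
      if e1.1 - e0.1 == 2 && e0.2.1 + e1.2.1 == 0 then
        acc ++ [(e0.1, e0.2.1, (4 : Int))]
      else
        acc ++ [(e0.1, e0.2.1, (2 : Int)), (e1.1, e1.2.1, (2 : Int))]) []
  PySem.List.sorted finalList (fun x => x.2.1)

-- ===== PORT B =====
def splitWrites_py_alt (tuples : List (Int × Int)) : List (Int × Int × Int) :=
  let result : List (Int × Int × Int) :=
    tuples.foldl (fun (acc : List (Int × Int × Int)) (e : Int × Int) =>
      let low := PySem.Int.band e.2 0xFFFF
      let high := PySem.Int.band (e.2 >>> (16:Nat)) 0xFFFF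
      if low == 0 && high == 0 then
        acc ++ [(e.1, 0, (4 : Int))]
      else
        acc ++ [(e.1, low, (2 : Int)), (e.1 + 2, high, (2 : Int))]) []
  PySem.List.sorted result (fun x => x.2.1)

-- ===== PRECONDITION & SPEC =====
def Spec_splitWrites_py (tuples : List (Int × Int)) (out : List (Int × Int × Int)) : Prop := out = splitWrites_py_alt tuples
instance (tuples : List (Int × Int)) (out : List (Int × Int × Int)) : Decidable (Spec_splitWrites_py tuples out) := by unfold Spec_splitWrites_py; infer_instance

-- ===== CLAIM (what is proved, stated in full; the proofs are below) =====
def Claim_equal_splitWrites_py : Prop := ∀ (tuples : List (Int × Int)), Dom_splitWrites_py tuples → Spec_splitWrites_py tuples (splitWrites_py tuples)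

-- ===== LEMMAS AND PROOFS =====

-- the two 16-bit chunks of one tuple, as A's split pass produces them
def pvChunks (e : Int × Int) : List (Int × Int × Int) :=
  [(e.1, PySem.Int.band e.2 0xFFFF, (2 : Int)), (e.1 + 2, PySem.Int.band (e.2 >>> (16:Nat)) 0xFFFF, (2 : Int))]

-- what B emits for one tuple
def pvEmit (e : Int × Int) : List (Int × Int × Int) :=
  if PySem.Int.band e.2 0xFFFF == 0 && PySem.Int.band (e.2 >>> (16:Nat)) 0xFFFF == 0 then
    [(e.1, 0, (4 : Int))]
  else
    [(e.1, PySem.Int.band e.2 0xFFFF, (2 : Int)), (e.1 + 2, PySem.Int.band (e.2 >>> (16:Nat)) 0xFFFF, (2 : Int))]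

lemma pvInitial_eq_flatMap (tuples : List (Int × Int)) :
    tuples.foldl (fun acc entry =>
      (PySem.List.pyRange 0 2 1).foldl (fun (acc2 : List (Int × Int × Int)) (i : Int) =>
        acc2 ++ [(entry.1 + i * 2, PySem.Int.band ((entry.2 : Int) >>> ((16 * i).toNat : Nat)) 0xFFFF, (2 : Int))]) acc) []
    = tuples.flatMap pvChunks := by
  have hstep : ∀ (acc : List (Int × Int × Int)) (entry : Int × Int),
      (PySem.List.pyRange 0 2 1).foldl (fun (acc2 : List (Int × Int × Int)) (i : Int) =>
        acc2 ++ [(entry.1 + i * 2, PySem.Int.band ((entry.2 : Int) >>> ((16 * i).toNat : Nat)) 0xFFFF, (2 : Int))]) acc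
      = acc ++ pvChunks entry := by
    intro acc entry
    have hr : PySem.List.pyRange 0 2 1 = [0, 1] := by decide
    rw [hr]
    simp [List.foldl, pvChunks]
  rw [PySem.List.foldl_congr_mem _ _ (fun acc entry => acc ++ pvChunks entry) _
    (fun acc x _ => hstep acc x)]
  rw [PySem.List.foldl_append_eq_flatMap]
  rfl

lemma pvLength_flatMap_chunks (L : List (Int × Int)) :
    (L.flatMap pvChunks).length = 2 * L.length := by
  induction L with
  | nil => rfl
  | cons e rest ih => simp [List.flatMap_cons, pvChunks, ih]; ring

lemma pvResult_eq_flatMap (tuples : List (Int × Int)) :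
    tuples.foldl (fun (acc : List (Int × Int × Int)) (e : Int × Int) =>
      let low := PySem.Int.band e.2 0xFFFF
      let high := PySem.Int.band (e.2 >>> (16:Nat)) 0xFFFF
      if low == 0 && high == 0 then
        acc ++ [(e.1, 0, (4 : Int))]
      else
        acc ++ [(e.1, low, (2 : Int)), (e.1 + 2, high, (2 : Int))]) []
    = tuples.flatMap pvEmit := by
  have hstep : ∀ (acc : List (Int × Int × Int)) (e : Int × Int),
      (let low := PySem.Int.band e.2 0xFFFF
       let high := PySem.Int.band (e.2 >>> (16:Nat)) 0xFFFF
       if low == 0 && high == 0 then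
         acc ++ [(e.1, 0, (4 : Int))]
       else
         acc ++ [(e.1, low, (2 : Int)), (e.1 + 2, high, (2 : Int))])
      = acc ++ pvEmit e := by
    intro acc e
    by_cases h : (PySem.Int.band e.2 0xFFFF == 0 && PySem.Int.band (e.2 >>> (16:Nat)) 0xFFFF == 0) = true <;>
      simp [pvEmit, h]
  rw [PySem.List.foldl_congr_mem _ _ (fun acc e => acc ++ pvEmit e) _
    (fun acc x _ => hstep acc x)]
  rw [PySem.List.foldl_append_eq_flatMap]
  rfl

lemma pvPyRange_two (a : Int) (n : Nat) :
    PySem.List.pyRange a (a + 2 * n - 1) 2 = (List.range n).map (fun k : Nat => a + 2 * (k : Int)) := by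
  rw [PySem.List.pyRange_of_pos _ _ (by norm_num : (0:Int) < 2)]
  rcases Nat.eq_zero_or_pos n with h0 | hp
  · subst h0
    rw [if_neg (by omega)]
  · rw [if_pos (by omega)]
    have hN : ((a + 2 * (n:Int) - 1 - a + 2 - 1) / 2).toNat = n := by omega
    rw [hN]

lemma pvGetD_flatMap_chunks (L : List (Int × Int)) (k : Nat) (hk : k < L.length) :
    (L.flatMap pvChunks).getD (2 * k) (0, 0, 0) = (pvChunks (L.getD k (0, 0)))[0]!
    ∧ (L.flatMap pvChunks).getD (2 * k + 1) (0, 0, 0) = (pvChunks (L.getD k (0, 0)))[1]! := by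
  induction L generalizing k with
  | nil => simp at hk
  | cons e rest ih =>
      cases k with
      | zero => simp [pvChunks, List.flatMap_cons]
      | succ k =>
          have h2 : 2 * (k + 1) = (2 * k) + 1 + 1 := by omega
          rw [h2]
          simp only [List.flatMap_cons, pvChunks, List.cons_append, List.nil_append,
            List.getD_cons_succ]
          exact ih k (by simpa using hk)

lemma pvFlatMapOfMap {α β γ : Type} (l : List α) (g : α → β) (f : β → List γ) :
    (l.map g).flatMap f = l.flatMap (fun x => f (g x)) := by
  induction l with
  | nil => rfl
  | cons x xs ih => simp only [List.map_cons, List.flatMap_cons, ih]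

lemma pvFlatMap_congr_mem {α β : Type} (l : List α) (f g : α → List β)
    (h : ∀ x ∈ l, f x = g x) : l.flatMap f = l.flatMap g := by
  induction l with
  | nil => rfl
  | cons x xs ih =>
      simp only [List.flatMap_cons, h x (List.mem_cons_self), ih (fun y hy => h y (List.mem_cons_of_mem _ hy))]

lemma pvIdx_flatMap {β : Type} (L : List (Int × Int)) (q : Int × Int → List β) :
    (List.range L.length).flatMap (fun k => q (L.getD k (0, 0))) = L.flatMap q := by
  induction L with
  | nil => rfl
  | cons e rest ih =>
      simp only [List.length_cons, List.range_succ_eq_map, List.flatMap_cons,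
        List.flatMap_map, List.getD_cons_zero, List.getD_cons_succ]
      exact congrArg _ ih

-- A's pairing-loop body, accumulator factored out
def pvPairStep (init : List (Int × Int × Int)) (index : Int) : List (Int × Int × Int) :=
  let e0 := PySem.List.pyGetD init index (0, 0, 0)
  let e1 := PySem.List.pyGetD init (index + 1) (0, 0, 0)
  if e1.1 - e0.1 == 2 && e0.2.1 + e1.2.1 == 0 then
    [(e0.1, e0.2.1, (4 : Int))]
  else
    [(e0.1, e0.2.1, (2 : Int)), (e1.1, e1.2.1, (2 : Int))]

lemma pvBand_nonneg (x : Int) : 0 ≤ PySem.Int.band x 0xFFFF := by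
  rw [PySem.Int.band_comm]
  exact PySem.Int.band_nonneg_of_nonneg_left x (by norm_num)

lemma pvPairStep_eval (L : List (Int × Int)) (k : Nat) (hk : k < L.length) :
    pvPairStep (L.flatMap pvChunks) (0 + 2 * (k : Int)) = pvEmit (L.getD k (0, 0)) := by
  obtain ⟨hlo, hhi⟩ := pvGetD_flatMap_chunks L k hk
  set x := L.getD k (0, 0) with hx
  have c0 : (pvChunks x)[0]! = (x.1, PySem.Int.band x.2 0xFFFF, (2 : Int)) := rfl
  have c1 : (pvChunks x)[1]! = (x.1 + 2, PySem.Int.band (x.2 >>> (16:Nat)) 0xFFFF, (2 : Int)) := rfl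
  have e0 : PySem.List.pyGetD (L.flatMap pvChunks) (0 + 2 * (k : Int)) (0, 0, 0)
      = (x.1, PySem.Int.band x.2 0xFFFF, (2 : Int)) := by
    have : (0 + 2 * (k : Int)) = ((2 * k : Nat) : Int) := by push_cast; ring
    rw [this, PySem.List.pyGetD_natCast, hlo, c0]
  have e1 : PySem.List.pyGetD (L.flatMap pvChunks) (0 + 2 * (k : Int) + 1) (0, 0, 0)
      = (x.1 + 2, PySem.Int.band (x.2 >>> (16:Nat)) 0xFFFF, (2 : Int)) := by
    have : (0 + 2 * (k : Int) + 1) = ((2 * k + 1 : Nat) : Int) := by push_cast; ring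
    rw [this, PySem.List.pyGetD_natCast, hhi, c1]
  unfold pvPairStep pvEmit
  rw [e0, e1]
  have hlow := pvBand_nonneg x.2
  have hhigh := pvBand_nonneg (x.2 >>> (16:Nat))
  by_cases h : PySem.Int.band x.2 0xFFFF = 0 ∧ PySem.Int.band (x.2 >>> (16:Nat)) 0xFFFF = 0
  · obtain ⟨h1, h2⟩ := h
    simp [h1, h2]
  · have hsum : PySem.Int.band x.2 0xFFFF + PySem.Int.band (x.2 >>> (16:Nat)) 0xFFFF ≠ 0 := by
      rcases not_and_or.mp h with h1 | h1 <;> omega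
    have hb : ¬ (PySem.Int.band x.2 0xFFFF = 0 ∧ PySem.Int.band (x.2 >>> (16:Nat)) 0xFFFF = 0) := h
    simp only [beq_iff_eq, Bool.and_eq_true]
    rw [if_neg (by simp [hsum]), if_neg (by simpa [decide_eq_true_eq] using hb)]

-- ===== VERDICT (by name: the statement is the Claim_ definition above) =====
lemma pvMain (tuples : List (Int × Int)) :
    splitWrites_py tuples = splitWrites_py_alt tuples := by
  simp only [splitWrites_py, splitWrites_py_alt]
  rw [pvInitial_eq_flatMap, pvResult_eq_flatMap]
  congr 1
  -- the pairing loop over the split list equals B's single pass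
  have hlen : ((tuples.flatMap pvChunks).length : Int) - 1 = 0 + 2 * (tuples.length : Nat) - 1 := by
    rw [pvLength_flatMap_chunks]; push_cast; ring
  rw [hlen, pvPyRange_two 0 tuples.length]
  have hstep : ∀ (acc : List (Int × Int × Int)) (index : Int),
      (let e0 := PySem.List.pyGetD (tuples.flatMap pvChunks) index (0, 0, 0)
       let e1 := PySem.List.pyGetD (tuples.flatMap pvChunks) (index + 1) (0, 0, 0)
       if e1.1 - e0.1 == 2 && e0.2.1 + e1.2.1 == 0 then
         acc ++ [(e0.1, e0.2.1, (4 : Int))]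
       else
         acc ++ [(e0.1, e0.2.1, (2 : Int)), (e1.1, e1.2.1, (2 : Int))])
      = acc ++ pvPairStep (tuples.flatMap pvChunks) index := by
    intro acc index
    unfold pvPairStep
    by_cases h : (((PySem.List.pyGetD (tuples.flatMap pvChunks) (index + 1) (0, 0, 0)).1
        - (PySem.List.pyGetD (tuples.flatMap pvChunks) index (0, 0, 0)).1 == 2)
        && ((PySem.List.pyGetD (tuples.flatMap pvChunks) index (0, 0, 0)).2.1
        + (PySem.List.pyGetD (tuples.flatMap pvChunks) (index + 1) (0, 0, 0)).2.1 == 0)) = true <;>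
      simp only [h, if_true, if_false, Bool.false_eq_true]
  rw [PySem.List.foldl_congr_mem _ _
      (fun acc index => acc ++ pvPairStep (tuples.flatMap pvChunks) index) _
      (fun acc x _ => hstep acc x),
    PySem.List.foldl_append_eq_flatMap, List.nil_append,
    pvFlatMapOfMap (List.range tuples.length) (fun k : Nat => 0 + 2 * (k : Int))
      (pvPairStep (tuples.flatMap pvChunks))]
  have hcong : (List.range tuples.length).flatMap
        (fun k : Nat => pvPairStep (tuples.flatMap pvChunks) (0 + 2 * (k : Int)))
      = (List.range tuples.length).flatMap (fun k : Nat => pvEmit (tuples.getD k (0, 0))) := by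
    refine pvFlatMap_congr_mem _ _ _ ?_
    intro k hkmem
    exact pvPairStep_eval tuples k (List.mem_range.mp hkmem)
  rw [hcong]
  exact pvIdx_flatMap tuples pvEmit

theorem splitWrites_py_spec : Claim_equal_splitWrites_py := by
  intro tuples _
  unfold Spec_splitWrites_py
  exact pvMain tuples
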